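-- pv_equiv track=rewrite | github.com/cnorthwood/ternip | ternip/rule_engine/normalisation_functions/words_to_num.py | _words_to_num
-- ===== SOURCE A (Python) =====
-- from operator import itemgetter
--
-- def _words_to_num(nums):
--     """
--     Recursively break down a number string into individual number components,
--     compute the value of those components (basically, the bit before the largest
--     number, and the bit after) and then put it all back together.
--     """
--
--     # base case
--     if len(nums) == 1:
--         return nums[0]
--
--     # find highest number in string
--     (highest_num, highest_num_i) = max(zip(nums, range(len(nums))), key=itemgetter(0))
--     before = nums[:highest_num_i]
--     after = nums[highest_num_i + 1:]
--
--     # If there are no numbers before the biggest term, then assume it means 1 of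
--     # those units
--     if len(before) > 0:
--         before = _words_to_num(before)
--     else:
--         before = 1
--
--     # if there are no numbers after, then append 0 to it
--     if len(after) > 0:
--         after = _words_to_num(after)
--     else:
--         after = 0
--
--     return (before * highest_num) + after
-- ===== SOURCE B (Python) =====
-- def _words_to_num(nums):
--     """
--     One-pass evaluation of the number-word list.
--
--     A evaluates the list by recursively splitting at the (first) maximum,
--     which is O(n^2) in the worst case.  B builds the same max-rooted
--     (first-occurrence ties) hierarchy with a monotonic stack and evaluates
--     it bottom-up on the fly, in a single O(n) pass.  Each stack entry is
--     (value, left) where left is the evaluated part before that value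
--     (None meaning "nothing before it", i.e. an implicit 1 multiplier).
--     """
--     stack = []
--     for x in nums:
--         cur = None
--         while stack and stack[-1][0] < x:
--             v, left = stack.pop()
--             cur = (1 if left is None else left) * v + (0 if cur is None else cur)
--         stack.append((x, cur))
--     res = None
--     while stack:
--         v, left = stack.pop()
--         res = (1 if left is None else left) * v + (0 if res is None else res)
--     return res
-- ===== Notes on version B (the rewrite author's own statement) =====
-- stated objective: faster
-- what changed: Replaced the recursive split-at-first-maximum evaluation with a single left-to-right monotonic-stack pass that builds and evaluates the same max-rooted hierarchy bottom-up on the fly.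
import Mathlib
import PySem

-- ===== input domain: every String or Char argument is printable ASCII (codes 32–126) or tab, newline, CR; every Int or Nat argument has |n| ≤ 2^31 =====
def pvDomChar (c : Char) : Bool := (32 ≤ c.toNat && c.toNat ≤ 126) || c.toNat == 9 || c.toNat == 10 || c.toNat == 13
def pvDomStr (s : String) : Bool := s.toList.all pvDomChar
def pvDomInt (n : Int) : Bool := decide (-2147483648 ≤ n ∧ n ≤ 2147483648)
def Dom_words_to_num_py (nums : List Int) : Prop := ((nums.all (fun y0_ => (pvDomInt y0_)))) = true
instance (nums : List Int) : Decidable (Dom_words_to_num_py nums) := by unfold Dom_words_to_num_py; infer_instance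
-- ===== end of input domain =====

-- B replaces A's recursive split at the first maximum by one monotonic-stack pass; the return
-- values agree on every non-empty list (on [] Python A raises ValueError, excluded by Pre_).

-- ===== PORT A =====
-- A: recursive split at the first maximum (max(zip(nums, range(len(nums))), key=itemgetter(0))).
def words_to_num_py (nums : List Int) : Int :=
  if nums.length = 1 then
    (PySem.List.pyGet? nums 0).getD 0   -- nums[0]; provably some here
  else
    match hm : PySem.List.max? nums.zipIdx (fun p => p.1) with
    | none => 0    -- only for nums = []: Python's max raises ValueError there (outside Pre_)
    | some (hv, hi) =>
      let before := PySem.List.slice nums none (some (hi : Int))     -- nums[:hi]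
      let after := PySem.List.slice nums (some ((hi : Int) + 1)) none -- nums[hi+1:]
      (if _hb : 0 < before.length then words_to_num_py before else 1) * hv +
      (if _ha : 0 < after.length then words_to_num_py after else 0)
termination_by nums.length
decreasing_by
  · have hmem := PySem.List.max?_mem hm
    have h := List.mem_zipIdx hmem
    simp only [PySem.List.slice_to_natCast, List.length_take]
    omega
  · have hmem := PySem.List.max?_mem hm
    have h := List.mem_zipIdx hmem
    have hcast : ((hi : Int) + 1) = ((hi + 1 : Nat) : Int) := by push_cast; ring
    simp only [hcast, PySem.List.slice_from_natCast, List.length_drop]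
    omega

-- ===== PORT B =====
-- B: monotonic stack of (value, evaluated-left-part) pairs, head = top of stack.
def altCombine (left : Option Int) (v : Int) (cur : Option Int) : Int :=
  (left.getD 1) * v + (cur.getD 0)

-- the inner `while stack and stack[-1][0] < x` pop loop
def altPop : List (Int × Option Int) → Int → Option Int → (List (Int × Option Int)) × Option Int
  | [], _, cur => ([], cur)
  | (v, left) :: rest, x, cur =>
      if v < x then altPop rest x (some (altCombine left v cur))
      else ((v, left) :: rest, cur)

-- one iteration of `for x in nums`
def altStep (st : List (Int × Option Int)) (x : Int) : List (Int × Option Int) :=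
  match altPop st x none with
  | (st', cur) => (x, cur) :: st'

-- the final `while stack` drain loop
def altFlush : List (Int × Option Int) → Option Int → Option Int
  | [], res => res
  | (v, left) :: rest, res => altFlush rest (some (altCombine left v res))

def words_to_num_py_alt (nums : List Int) : Int :=
  (altFlush (nums.foldl altStep []) none).getD 0

-- ===== PRECONDITION & SPEC =====
-- Pre_ excludes only the empty list, on which Python A raises ValueError (max of an empty sequence).
def Pre_words_to_num_py (nums : List Int) : Prop := nums ≠ []
instance (nums : List Int) : Decidable (Pre_words_to_num_py nums) := by unfold Pre_words_to_num_py; infer_instance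
def pvWitness_words_to_num_py : List Int := [3, 1, 2]

def Spec_words_to_num_py (nums : List Int) (out : Int) : Prop := out = words_to_num_py_alt nums
instance (nums : List Int) (out : Int) : Decidable (Spec_words_to_num_py nums out) := by unfold Spec_words_to_num_py; infer_instance

-- ===== CLAIM (what is proved, stated in full; the proofs are below) =====
def Claim_equal_words_to_num_py : Prop := ∀ (nums : List Int), Dom_words_to_num_py nums → Pre_words_to_num_py nums → Spec_words_to_num_py nums (words_to_num_py nums)

-- ===== LEMMAS AND PROOFS =====

-- ---- A-side: the first maximum of s ++ v :: t with s < v and t ≤ v sits at index s.length ----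

def maxF (acc : Option (Int × Nat)) (x : Int × Nat) : Option (Int × Nat) :=
  match acc with
  | none => some x
  | some m => if m.1 < x.1 then some x else some m

theorem max?_eq_foldl (l : List (Int × Nat)) :
    PySem.List.max? l (fun p => p.1) = l.foldl maxF none := by
  unfold PySem.List.max?
  apply List.foldl_ext
  intro acc x _
  cases acc <;> rfl

theorem fst_mem_of_mem_zipIdx {l : List Int} {k : Nat} {p : Int × Nat}
    (h : p ∈ l.zipIdx k) : p.1 ∈ l := by
  obtain ⟨x, i⟩ := p
  have := List.mem_zipIdx h
  obtain ⟨_, h2, h3⟩ := this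
  simp only []
  rw [h3]
  exact List.getElem_mem _

theorem foldl_maxF_stay (l : List (Int × Nat)) :
    ∀ (m : Int × Nat), (∀ p ∈ l, p.1 ≤ m.1) → l.foldl maxF (some m) = some m := by
  induction l with
  | nil => intro m _; rfl
  | cons a l ih =>
    intro m h
    have ha : a.1 ≤ m.1 := h a (by simp)
    have : maxF (some m) a = some m := by
      simp [maxF]; omega
    rw [List.foldl_cons, this]
    exact ih m (fun p hp => h p (by simp [hp]))

theorem foldl_maxF_split (s : List Int) (v : Int) (t : List Int) :
    ∀ (k : Nat) (m : Int × Nat), m.1 < v → (∀ x ∈ s, x < v) → (∀ x ∈ t, x ≤ v) →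
    ((s ++ v :: t).zipIdx k).foldl maxF (some m) = some (v, s.length + k) := by
  induction s with
  | nil =>
    intro k m hm _ ht
    simp only [List.nil_append, List.zipIdx_cons, List.foldl_cons]
    have : maxF (some m) (v, k) = some (v, k) := by simp [maxF]; omega
    rw [this]
    have := foldl_maxF_stay (t.zipIdx (k + 1)) (v, k)
      (fun p hp => ht p.1 (fst_mem_of_mem_zipIdx hp))
    rw [this]
    simp
  | cons a s ih =>
    intro k m hm hs ht
    simp only [List.cons_append, List.zipIdx_cons, List.foldl_cons]
    have ha : a < v := hs a (by simp)
    have hlen : s.length + (k + 1) = (a :: s).length + k := by simp; omega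
    by_cases hma : m.1 < a
    · have h0 : maxF (some m) (a, k) = some (a, k) := by simp [maxF, hma]
      rw [h0, ih (k + 1) (a, k) ha (fun x hx => hs x (by simp [hx])) ht, hlen]
    · have h0 : maxF (some m) (a, k) = some m := by simp [maxF, hma]
      rw [h0, ih (k + 1) m hm (fun x hx => hs x (by simp [hx])) ht, hlen]

theorem max?_split (s : List Int) (v : Int) (t : List Int)
    (hs : ∀ x ∈ s, x < v) (ht : ∀ x ∈ t, x ≤ v) :
    PySem.List.max? ((s ++ v :: t).zipIdx) (fun p => p.1) = some (v, s.length) := by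
  rw [max?_eq_foldl]
  cases s with
  | nil =>
    simp only [List.nil_append, List.zipIdx_cons, List.foldl_cons]
    have h0 : maxF none (v, 0) = some (v, 0) := rfl
    rw [h0, foldl_maxF_stay _ _ (fun p hp => ht p.1 (fst_mem_of_mem_zipIdx hp))]
    simp
  | cons a s =>
    simp only [List.cons_append, List.zipIdx_cons, List.foldl_cons]
    have h0 : maxF none (a, 0) = some (a, 0) := rfl
    rw [h0, foldl_maxF_split s v t 1 (a, 0) (hs a (by simp))
      (fun x hx => hs x (by simp [hx])) ht]
    simp

-- ---- the key characterisation of A on a list split at its first maximum ----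

theorem words_split (s : List Int) (v : Int) (t : List Int)
    (hs : ∀ x ∈ s, x < v) (ht : ∀ x ∈ t, x ≤ v) :
    words_to_num_py (s ++ v :: t) =
      (if s = [] then 1 else words_to_num_py s) * v +
      (if t = [] then 0 else words_to_num_py t) := by
  by_cases hlen : (s ++ v :: t).length = 1
  · have hsnil : s = [] := by
      cases s with
      | nil => rfl
      | cons a s => simp at hlen
    have htnil : t = [] := by
      subst hsnil
      cases t with
      | nil => rfl
      | cons a t => simp at hlen
    subst hsnil; subst htnil
    rw [words_to_num_py.eq_def]
    simp [PySem.List.pyGet?, PySem.List.pyIdx?]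
  · rw [words_to_num_py.eq_def]
    simp only [if_neg hlen]
    rw [max?_split s v t hs ht]
    have hbefore : PySem.List.slice (s ++ v :: t) none (some ((s.length : Nat) : Int)) = s := by
      rw [PySem.List.slice_to_natCast, List.take_left]
    have hcast : ((s.length : Nat) : Int) + 1 = (((s.length + 1 : Nat)) : Int) := by push_cast; ring
    have hafter : PySem.List.slice (s ++ v :: t) (some (((s.length : Nat) : Int) + 1)) none = t := by
      rw [hcast, PySem.List.slice_from_natCast]
      have : s ++ v :: t = (s ++ [v]) ++ t := by simp
      rw [this]
      have hl : s.length + 1 = (s ++ [v]).length := by simp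
      rw [hl, List.drop_left]
    simp only [hbefore, hafter]
    cases s with
    | nil =>
      cases t with
      | nil => simp at hlen
      | cons b t => simp
    | cons a s =>
      cases t with
      | nil => simp
      | cons b t => simp

-- ---- B-side invariant: what a stack (head = top) stands for ----

-- Seg s c: c is the evaluation of the segment s (none stands for the empty segment)
def Seg (s : List Int) (c : Option Int) : Prop :=
  (s = [] ∧ c = none) ∨ (s ≠ [] ∧ c = some (words_to_num_py s))

-- Good st p: the stack st (head = top) is what processing the prefix p leaves behind
def Good : List (Int × Option Int) → List Int → Prop
  | [], p => p = []
  | (v, left) :: rest, p =>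
      ∃ q s, p = q ++ s ++ [v] ∧ Good rest q ∧ (∀ x ∈ s, x < v) ∧ Seg s left ∧
        (∀ w ∈ rest, v ≤ w.1)

theorem seg_combine (sv s : List Int) (v : Int) (left cur : Option Int)
    (hsv : ∀ x ∈ sv, x < v) (hsle : ∀ y ∈ s, y ≤ v)
    (hL : Seg sv left) (hC : Seg s cur) :
    Seg (sv ++ v :: s) (some (altCombine left v cur)) := by
  right
  constructor
  · simp
  · congr 1
    rw [words_split sv v s hsv hsle]
    rcases hL with ⟨h1, h2⟩ | ⟨h1, h2⟩ <;> rcases hC with ⟨g1, g2⟩ | ⟨g1, g2⟩ <;>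
      subst h2 <;> subst g2 <;> simp [altCombine, h1, g1]

theorem pop_good : ∀ (st : List (Int × Option Int)) (x : Int) (cur : Option Int)
    (q s : List Int), Good st q → Seg s cur → (∀ y ∈ s, y < x) →
    (∀ y ∈ s, ∀ w ∈ st, y ≤ w.1) →
    ∃ st2 cur2 q2 s2, altPop st x cur = (st2, cur2) ∧ Good st2 q2 ∧
      q ++ s = q2 ++ s2 ∧ Seg s2 cur2 ∧ (∀ y ∈ s2, y < x) ∧
      (∀ y ∈ s2, ∀ w ∈ st2, y ≤ w.1) ∧ (∀ w ∈ st2, x ≤ w.1) := by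
  intro st
  induction st with
  | nil =>
    intro x cur q s hg hseg hlt _
    refine ⟨[], cur, q, s, rfl, hg, rfl, hseg, hlt, ?_, ?_⟩ <;> simp
  | cons a rest ih =>
    intro x cur q s hg hseg hlt hle
    obtain ⟨v, left⟩ := a
    obtain ⟨q', sv, hp, hg', hsv, hSegL, hmono⟩ := hg
    by_cases hvx : v < x
    · have hsle : ∀ y ∈ s, y ≤ v := fun y hy => hle y hy (v, left) (by simp)
      have hseg' : Seg (sv ++ v :: s) (some (altCombine left v cur)) :=
        seg_combine sv s v left cur hsv hsle hSegL hseg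
      have hlt' : ∀ y ∈ sv ++ v :: s, y < x := by
        intro y hy
        rcases List.mem_append.1 hy with hy | hy
        · exact lt_trans (hsv y hy) hvx
        · rcases List.mem_cons.1 hy with rfl | hy
          · exact hvx
          · exact hlt y hy
      have hle' : ∀ y ∈ sv ++ v :: s, ∀ w ∈ rest, y ≤ w.1 := by
        intro y hy w hw
        rcases List.mem_append.1 hy with hy | hy
        · exact le_trans (le_of_lt (hsv y hy)) (hmono w hw)
        · rcases List.mem_cons.1 hy with rfl | hy
          · exact hmono w hw
          · exact hle y hy w (by simp [hw])
      obtain ⟨st2, cur2, q2, s2, heq, h1, h2, h3, h4, h5, h6⟩ :=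
        ih x (some (altCombine left v cur)) q' (sv ++ v :: s) hg' hseg' hlt' hle'
      refine ⟨st2, cur2, q2, s2, ?_, h1, ?_, h3, h4, h5, h6⟩
      · simp [altPop, hvx, heq]
      · rw [hp, ← h2]
        simp
    · refine ⟨(v, left) :: rest, cur, q, s, ?_, ?_, rfl, hseg, hlt, hle, ?_⟩
      · simp [altPop, hvx]
      · exact ⟨q', sv, hp, hg', hsv, hSegL, hmono⟩
      · intro w hw
        rcases List.mem_cons.1 hw with rfl | hw
        · simpa using le_of_not_gt hvx
        · exact le_trans (le_of_not_gt hvx) (hmono w hw)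

theorem step_good (st : List (Int × Option Int)) (q : List Int) (x : Int)
    (hg : Good st q) : Good (altStep st x) (q ++ [x]) := by
  obtain ⟨st2, cur2, q2, s2, heq, h1, h2, h3, h4, h5, h6⟩ :=
    pop_good st x none q [] hg (Or.inl ⟨rfl, rfl⟩) (by simp) (by simp)
  simp only [altStep, heq]
  refine ⟨q2, s2, ?_, h1, h4, h3, h6⟩
  simp only [List.append_nil] at h2
  rw [h2, List.append_assoc]

theorem fold_good : ∀ (l : List Int) (st : List (Int × Option Int)) (q : List Int),
    Good st q → Good (l.foldl altStep st) (q ++ l) := by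
  intro l
  induction l with
  | nil => intro st q hg; simpa using hg
  | cons a l ih =>
    intro st q hg
    have := ih (altStep st a) (q ++ [a]) (step_good st q a hg)
    simpa using this

theorem flush_good : ∀ (st : List (Int × Option Int)) (cur : Option Int)
    (q s : List Int), Good st q → Seg s cur → (∀ y ∈ s, ∀ w ∈ st, y ≤ w.1) →
    Seg (q ++ s) (altFlush st cur) := by
  intro st
  induction st with
  | nil =>
    intro cur q s hg hseg _
    have : q = [] := hg
    subst this
    simpa [altFlush] using hseg
  | cons a rest ih =>
    intro cur q s hg hseg hle
    obtain ⟨v, left⟩ := a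
    obtain ⟨q', sv, hp, hg', hsv, hSegL, hmono⟩ := hg
    have hsle : ∀ y ∈ s, y ≤ v := fun y hy => hle y hy (v, left) (by simp)
    have hseg' : Seg (sv ++ v :: s) (some (altCombine left v cur)) :=
      seg_combine sv s v left cur hsv hsle hSegL hseg
    have hle' : ∀ y ∈ sv ++ v :: s, ∀ w ∈ rest, y ≤ w.1 := by
      intro y hy w hw
      rcases List.mem_append.1 hy with hy | hy
      · exact le_trans (le_of_lt (hsv y hy)) (hmono w hw)
      · rcases List.mem_cons.1 hy with rfl | hy
        · exact hmono w hw
        · exact hle y hy w (by simp [hw])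
    have := ih (some (altCombine left v cur)) q' (sv ++ v :: s) hg' hseg' hle'
    rw [hp]
    simpa [altFlush] using this

theorem words_to_num_py_main : ∀ (nums : List Int), nums ≠ [] →
    words_to_num_py nums = words_to_num_py_alt nums := by
  intro nums hne
  have hg : Good (nums.foldl altStep []) nums := by
    simpa using fold_good nums [] [] rfl
  have := flush_good (nums.foldl altStep []) none nums [] hg
    (Or.inl ⟨rfl, rfl⟩) (by simp)
  rcases this with ⟨h1, _⟩ | ⟨_, h2⟩
  · exact absurd (by simpa using h1) hne
  · unfold words_to_num_py_alt
    rw [h2]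
    simp

-- ===== VERDICT (by name: the statement is the Claim_ definition above) =====
theorem words_to_num_py_spec : Claim_equal_words_to_num_py := by
  intro nums _ hpre
  unfold Spec_words_to_num_py
  exact words_to_num_py_main nums hpre
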